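-- pv_equiv track=rewrite | github.com/lmorgadodacosta/iTELL | lcc.py | remove_nested_parens
-- ===== SOURCE A (Python) =====
-- def remove_nested_parens(input_str):
--     """
--     Returns a copy of 'input_str' with any parenthesized (..) [..] text removed.
--     Nested parentheses are handled. It also returns a Boolean asserting if
--     the parenthesis were well balanced (True) or not (False).
--     """
--     result1 = ''
--     paren_level = 0
--     for ch in input_str:
--         if ch == '(':
--             paren_level += 1
--         elif (ch == ')') and paren_level:
--             paren_level -= 1
--         elif not paren_level:
--             result1 += ch
--     result2 = ''
--     paren_level2 = 0
--     for ch in result1: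
--         if ch == '[':
--             paren_level2 += 1
--         elif (ch == ']') and paren_level2:
--             paren_level2 -= 1
--         elif not paren_level2:
--             result2 += ch
--
--     if (paren_level==0) and (paren_level2==0):
--         balanced = True
--     else:
--         balanced = False
--     return (balanced, result2)
-- ===== SOURCE B (Python) =====
-- def remove_nested_parens(input_str):
--     out = []
--     paren_level = 0
--     bracket_level = 0
--     for ch in input_str:
--         if paren_level:
--             if ch == '(':
--                 paren_level += 1
--             elif ch == ')':
--                 paren_level -= 1
--         elif ch == '(':
--             paren_level += 1
--         elif ch == '[':
--             bracket_level += 1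
--         elif ch == ']' and bracket_level:
--             bracket_level -= 1
--         elif not bracket_level:
--             out.append(ch)
--     return (paren_level == 0 and bracket_level == 0, ''.join(out))
-- ===== Notes on version B (the rewrite author's own statement) =====
-- stated objective: alternative
-- what changed: Replaces A's two sequential passes (strip parens into an intermediate string via repeated +=, then strip brackets the same way) with one fused pass maintaining both nesting levels, appending kept chars to a list joined once.
import Mathlib
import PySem

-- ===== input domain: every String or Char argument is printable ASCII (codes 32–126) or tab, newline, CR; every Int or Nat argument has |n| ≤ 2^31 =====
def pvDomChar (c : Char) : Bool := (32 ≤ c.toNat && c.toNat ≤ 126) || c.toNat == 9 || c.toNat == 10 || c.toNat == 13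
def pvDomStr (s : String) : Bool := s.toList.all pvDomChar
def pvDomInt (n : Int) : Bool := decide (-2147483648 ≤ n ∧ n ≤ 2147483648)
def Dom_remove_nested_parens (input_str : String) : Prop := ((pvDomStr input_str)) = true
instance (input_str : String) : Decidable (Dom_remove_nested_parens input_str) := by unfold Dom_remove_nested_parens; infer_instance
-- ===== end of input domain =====

-- B fuses A's two sequential passes into one pass carrying both nesting levels (same result, one traversal, list+join output).

-- ===== PORT A =====
-- pass 1: strip parenthesized text (state: kept chars so far, paren_level)
def pvStepP (s : List Char × Nat) (ch : Char) : List Char × Nat :=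
  if ch = '(' then (s.1, s.2 + 1)
  else if ch = ')' ∧ s.2 ≠ 0 then (s.1, s.2 - 1)
  else if s.2 = 0 then (s.1 ++ [ch], s.2)
  else s

-- pass 2: strip bracketed text (state: kept chars so far, paren_level2)
def pvStepB (s : List Char × Nat) (ch : Char) : List Char × Nat :=
  if ch = '[' then (s.1, s.2 + 1)
  else if ch = ']' ∧ s.2 ≠ 0 then (s.1, s.2 - 1)
  else if s.2 = 0 then (s.1 ++ [ch], s.2)
  else s

def remove_nested_parens (input_str : String) : Bool × String :=
  let r1 := input_str.toList.foldl pvStepP ([], 0)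
  let r2 := r1.1.foldl pvStepB ([], 0)
  (decide (r1.2 = 0 ∧ r2.2 = 0), String.ofList r2.1)

-- ===== PORT B =====
-- single pass; state: kept chars, paren_level, bracket_level
def pvStepAlt (s : List Char × Nat × Nat) (ch : Char) : List Char × Nat × Nat :=
  if s.2.1 ≠ 0 then
    if ch = '(' then (s.1, s.2.1 + 1, s.2.2)
    else if ch = ')' then (s.1, s.2.1 - 1, s.2.2)
    else s
  else if ch = '(' then (s.1, s.2.1 + 1, s.2.2)
  else if ch = '[' then (s.1, s.2.1, s.2.2 + 1)
  else if ch = ']' ∧ s.2.2 ≠ 0 then (s.1, s.2.1, s.2.2 - 1)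
  else if s.2.2 = 0 then (s.1 ++ [ch], s.2.1, s.2.2)
  else s

def remove_nested_parens_alt (input_str : String) : Bool × String :=
  let r := input_str.toList.foldl pvStepAlt ([], 0, 0)
  (decide (r.2.1 = 0 ∧ r.2.2 = 0), String.ofList r.1)

-- ===== PRECONDITION & SPEC =====
def Spec_remove_nested_parens (input_str : String) (out : Bool × String) : Prop := out = remove_nested_parens_alt input_str
instance (input_str : String) (out : Bool × String) : Decidable (Spec_remove_nested_parens input_str out) := by unfold Spec_remove_nested_parens; infer_instance

-- ===== CLAIM (what is proved, stated in full; the proofs are below) =====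
def Claim_equal_remove_nested_parens : Prop := ∀ (input_str : String), Dom_remove_nested_parens input_str → Spec_remove_nested_parens input_str (remove_nested_parens input_str)

-- ===== LEMMAS AND PROOFS =====

-- accumulator of pass 1 factors out
theorem foldl_stepP_acc (l : List Char) (a : List Char) (p : Nat) :
    l.foldl pvStepP (a, p) = (a ++ (l.foldl pvStepP ([], p)).1, (l.foldl pvStepP ([], p)).2) := by
  induction l generalizing a p with
  | nil => simp
  | cons ch t ih =>
      simp only [List.foldl_cons, pvStepP]
      split_ifs with h1 h2 h3
      · exact ih a (p + 1)
      · exact ih a (p - 1)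
      · rw [ih (a ++ [ch]) p, ih ([] ++ [ch]) p]
        simp
      · exact ih a p

-- fusion: one pass of B equals pass 1 then pass 2 of A
theorem fuse (l : List Char) (p b : Nat) (acc : List Char) :
    l.foldl pvStepAlt (acc, p, b) =
      ((((l.foldl pvStepP ([], p)).1).foldl pvStepB (acc, b)).1,
       (l.foldl pvStepP ([], p)).2,
       (((l.foldl pvStepP ([], p)).1).foldl pvStepB (acc, b)).2) := by
  induction l generalizing p b acc with
  | nil => simp
  | cons ch t ih =>
      simp only [List.foldl_cons]
      by_cases hp : p = 0
      · subst hp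
        by_cases h1 : ch = '('
        · subst h1
          rw [show pvStepP ([], 0) '(' = ([], 1) from by simp [pvStepP],
              show pvStepAlt (acc, 0, b) '(' = (acc, 1, b) from by simp [pvStepAlt]]
          exact ih 1 b acc
        · have hA : pvStepP ([], 0) ch = ([ch], 0) := by simp [pvStepP, h1]
          rw [hA, foldl_stepP_acc t [ch] 0]
          simp only [List.singleton_append, List.foldl_cons]
          by_cases h2 : ch = '['
          · subst h2
            rw [show pvStepB (acc, b) '[' = (acc, b + 1) from by simp [pvStepB],
                show pvStepAlt (acc, 0, b) '[' = (acc, 0, b + 1) from by simp [pvStepAlt]]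
            exact ih 0 (b + 1) acc
          · by_cases h3 : ch = ']' ∧ b ≠ 0
            · rw [show pvStepB (acc, b) ch = (acc, b - 1) from by
                    simp [pvStepB, h3.1, h3.2],
                  show pvStepAlt (acc, 0, b) ch = (acc, 0, b - 1) from by
                    simp [pvStepAlt, h3.1, h3.2]]
              exact ih 0 (b - 1) acc
            · by_cases h4 : b = 0
              · subst h4
                rw [show pvStepB (acc, 0) ch = (acc ++ [ch], 0) from by
                      simp [pvStepB, h2],
                    show pvStepAlt (acc, 0, 0) ch = (acc ++ [ch], 0, 0) from by
                      simp [pvStepAlt, h1, h2]]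
                exact ih 0 0 (acc ++ [ch])
              · have h5 : ¬ ch = ']' := fun h => h3 ⟨h, h4⟩
                rw [show pvStepB (acc, b) ch = (acc, b) from by
                      simp [pvStepB, h2, h4, h5],
                    show pvStepAlt (acc, 0, b) ch = (acc, 0, b) from by
                      simp [pvStepAlt, h1, h2, h4, h5]]
                exact ih 0 b acc
      · by_cases h1 : ch = '('
        · subst h1
          rw [show pvStepP ([], p) '(' = ([], p + 1) from by simp [pvStepP],
              show pvStepAlt (acc, p, b) '(' = (acc, p + 1, b) from by simp [pvStepAlt, hp]]
          exact ih (p + 1) b acc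
        · by_cases h2 : ch = ')'
          · subst h2
            rw [show pvStepP ([], p) ')' = ([], p - 1) from by simp [pvStepP, hp],
                show pvStepAlt (acc, p, b) ')' = (acc, p - 1, b) from by simp [pvStepAlt, hp]]
            exact ih (p - 1) b acc
          · rw [show pvStepP ([], p) ch = ([], p) from by simp [pvStepP, h1, h2, hp],
                show pvStepAlt (acc, p, b) ch = (acc, p, b) from by simp [pvStepAlt, h1, h2, hp]]
            exact ih p b acc

-- ===== VERDICT (by name: the statement is the Claim_ definition above) =====
theorem remove_nested_parens_spec : Claim_equal_remove_nested_parens := by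
  intro input_str _
  unfold Spec_remove_nested_parens remove_nested_parens remove_nested_parens_alt
  rw [fuse input_str.toList 0 0 []]
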